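-- pv_equiv track=rewrite | github.com/saparia-data/data_structure | geeksforgeeks/queue/8_Circular_tour_difficult.py | petrolPump
-- ===== SOURCE A (Python) =====
-- def petrolPump(petrol, dist, n):
--
--     for start in range(n):
--
--         curr_petrol = 0
--         end = start
--
--         while(True):
--
--             curr_petrol += (petrol[end] - dist[end])
--
--             if(curr_petrol < 0):
--                 break
--
--             end = (end + 1) % n
--
--             if(end == start):
--                 return start + 1
-- ===== SOURCE B (Python) =====
-- def petrolPump(petrol, dist, n):
--     if n <= 0:
--         return None
--     start = 0
--     curr = 0
--     total = 0
--     for i in range(n):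
--         g = petrol[i] - dist[i]
--         total += g
--         curr += g
--         if curr < 0:
--             start = i + 1
--             curr = 0
--     if total < 0:
--         return None
--     return start + 1
-- ===== Notes on version B (the rewrite author's own statement) =====
-- stated objective: faster
-- what changed: Replaced the quadratic try-every-start simulation (outer loop over starts, inner circular walk) by the classic single-pass greedy: one scan keeping a running surplus that resets the candidate start whenever it goes negative, plus the total sum to decide feasibility.
import Mathlib
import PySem

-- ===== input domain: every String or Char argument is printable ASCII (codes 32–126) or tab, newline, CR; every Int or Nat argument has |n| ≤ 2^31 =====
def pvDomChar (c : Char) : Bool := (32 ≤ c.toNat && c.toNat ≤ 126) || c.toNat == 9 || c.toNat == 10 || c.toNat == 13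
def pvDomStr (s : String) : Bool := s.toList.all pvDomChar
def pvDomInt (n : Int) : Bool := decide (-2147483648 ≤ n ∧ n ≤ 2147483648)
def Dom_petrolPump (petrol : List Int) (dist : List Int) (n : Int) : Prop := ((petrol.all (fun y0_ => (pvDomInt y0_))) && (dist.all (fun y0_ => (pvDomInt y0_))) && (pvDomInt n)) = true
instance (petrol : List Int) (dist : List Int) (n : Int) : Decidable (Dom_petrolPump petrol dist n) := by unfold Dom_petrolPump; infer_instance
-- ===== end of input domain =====

-- B replaces A's quadratic try-every-start circular simulation by the single-pass greedy
-- (reset the candidate start when the running surplus goes negative); return values proved equal.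

-- ===== PORT A =====
-- Inner `while True` loop of A.  The loop either breaks (none), or advances `end` one
-- step around the circle and returns once `end` comes back to `start`, i.e. after at
-- most n additions; fuel `n.toNat` therefore suffices and the fuel-0 branch is
-- unreachable on the calls the port makes (a totalization guard only).
def petrolPumpInner (petrol dist : List Int) (n start : Int) : Nat → Int → Int → Option Int
  | 0, _, _ => none
  | k + 1, e, curr =>
    let curr' := curr + (PySem.List.pyGetD petrol e 0 - PySem.List.pyGetD dist e 0)
    if curr' < 0 then none
    else
      let e' := PySem.Int.mod (e + 1) n
      if e' = start then some (start + 1)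
      else petrolPumpInner petrol dist n start k e' curr'

-- `for start in range(n)`: return on the first start whose inner loop completes the tour.
def petrolPumpTry (petrol dist : List Int) (n : Int) : List Int → Option Int
  | [] => none
  | s :: rest =>
    match petrolPumpInner petrol dist n s n.toNat s 0 with
    | some r => some r
    | none => petrolPumpTry petrol dist n rest

def petrolPump (petrol : List Int) (dist : List Int) (n : Int) : Option Int :=
  petrolPumpTry petrol dist n (PySem.List.pyRange 0 n 1)

-- ===== PORT B =====
-- Single pass over (start, curr, total); reset start and curr when curr goes negative.
def petrolPump_alt (petrol : List Int) (dist : List Int) (n : Int) : Option Int :=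
  if n ≤ 0 then none
  else
    let st := (PySem.List.pyRange 0 n 1).foldl
      (fun (st : Int × Int × Int) i =>
        let g := PySem.List.pyGetD petrol i 0 - PySem.List.pyGetD dist i 0
        let total := st.2.2 + g
        let curr := st.2.1 + g
        if curr < 0 then (i + 1, 0, total) else (st.1, curr, total))
      (0, 0, 0)
    if st.2.2 < 0 then none else some (st.1 + 1)

-- ===== PRECONDITION & SPEC =====
-- Python A indexes petrol[end] and dist[end] for end in range(n); when n exceeds either
-- length it raises IndexError (a completed tour would have to visit the missing index
-- first, so no return can precede the raise).  Pre_ excludes exactly those inputs.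
def Pre_petrolPump (petrol : List Int) (dist : List Int) (n : Int) : Prop :=
  n ≤ (petrol.length : Int) ∧ n ≤ (dist.length : Int)
instance (petrol : List Int) (dist : List Int) (n : Int) : Decidable (Pre_petrolPump petrol dist n) := by unfold Pre_petrolPump; infer_instance

def pvWitness_petrolPump : List Int × List Int × Int := ([4, 6, 7, 4], [6, 5, 3, 5], 4)

def Spec_petrolPump (petrol : List Int) (dist : List Int) (n : Int) (out : Option Int) : Prop := out = petrolPump_alt petrol dist n
instance (petrol : List Int) (dist : List Int) (n : Int) (out : Option Int) : Decidable (Spec_petrolPump petrol dist n out) := by unfold Spec_petrolPump; infer_instance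

-- ===== CLAIM (what is proved, stated in full; the proofs are below) =====
def Claim_equal_petrolPump : Prop := ∀ (petrol : List Int) (dist : List Int) (n : Int), Dom_petrolPump petrol dist n → Pre_petrolPump petrol dist n → Spec_petrolPump petrol dist n (petrolPump petrol dist n)

-- ===== LEMMAS AND PROOFS =====

-- sum of f over [a, b)
def pvS (f : ℕ → ℤ) (a b : ℕ) : ℤ := ∑ i ∈ Finset.Ico a b, f i

-- circular partial sum: t terms starting at s, indices mod N (used with s < N, t ≤ N)
def pvCsum (f : ℕ → ℤ) (N s t : ℕ) : ℤ :=
  if s + t ≤ N then pvS f s (s + t) else pvS f s N + pvS f 0 (s + t - N)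

-- per-index surplus of the two lists
def pvD (petrol dist : List Int) (i : ℕ) : ℤ := petrol.getD i 0 - dist.getD i 0

-- greedy step, Nat-indexed form
def pvStep (f : ℕ → ℤ) (st : Int × Int × Int) (k : ℕ) : Int × Int × Int :=
  if st.2.1 + f k < 0 then ((k : ℤ) + 1, 0, st.2.2 + f k)
  else (st.1, st.2.1 + f k, st.2.2 + f k)

theorem pvS_self (f : ℕ → ℤ) (a : ℕ) : pvS f a a = 0 := by simp [pvS]

theorem pvS_split (f : ℕ → ℤ) {a b c : ℕ} (hab : a ≤ b) (hbc : b ≤ c) :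
    pvS f a c = pvS f a b + pvS f b c := (Finset.sum_Ico_consecutive _ hab hbc).symm

theorem pvS_succ (f : ℕ → ℤ) {a b : ℕ} (h : a ≤ b) :
    pvS f a (b + 1) = pvS f a b + f b := Finset.sum_Ico_succ_top h _

theorem pvCsum_zero (f : ℕ → ℤ) {N s : ℕ} (h : s ≤ N) : pvCsum f N s 0 = 0 := by
  simp [pvCsum, h, pvS_self]

theorem pvCsum_nowrap (f : ℕ → ℤ) {N s t : ℕ} (h : s + t ≤ N) :
    pvCsum f N s t = pvS f s (s + t) := by simp [pvCsum, h]

theorem pvCsum_full (f : ℕ → ℤ) {N s : ℕ} (hs : s < N) : pvCsum f N s N = pvS f 0 N := by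
  rcases Nat.eq_zero_or_pos s with h0 | h0
  · subst h0; simp [pvCsum, pvS]
  · have hcond : ¬ (s + N ≤ N) := by omega
    simp only [pvCsum, hcond, if_false]
    have h1 : s + N - N = s := by omega
    rw [h1]
    have hsplit := pvS_split f (Nat.zero_le s) (Nat.le_of_lt hs)
    linarith

theorem pvCsum_succ (f : ℕ → ℤ) {N s t : ℕ} (hs : s < N) (ht : t < N) :
    pvCsum f N s (t + 1) = pvCsum f N s t + f ((s + t) % N) := by
  by_cases h : s + t + 1 ≤ N
  · have h' : s + t ≤ N := by omega
    have hm : (s + t) % N = s + t := Nat.mod_eq_of_lt (by omega)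
    rw [pvCsum_nowrap f h', hm]
    have h2 : s + (t + 1) = (s + t) + 1 := by omega
    rw [pvCsum_nowrap f (by omega), h2, pvS_succ f (by omega)]
  · have hge : N ≤ s + t := by omega
    have hm : (s + t) % N = s + t - N := by
      have h2 : s + t - N < N := by omega
      have h3 : s + t = (s + t - N) + N := by omega
      conv_lhs => rw [h3]
      rw [Nat.add_mod_right]
      exact Nat.mod_eq_of_lt h2
    rw [hm]
    rcases Nat.eq_or_lt_of_le hge with heq | hlt
    · have hcond : ¬ (s + (t + 1) ≤ N) := by omega
      simp only [pvCsum, hcond, if_false]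
      have h2 : s + (t + 1) - N = 1 := by omega
      have h3 : s + t - N = 0 := by omega
      have h4 : pvS f 0 1 = f 0 := by
        have := pvS_succ f (Nat.le_refl 0); simpa [pvS_self] using this
      rw [if_pos (show s + t ≤ N from by omega), h2, h3, h4, heq]
    · have hc1 : ¬ (s + t ≤ N) := by omega
      have hc2 : ¬ (s + (t + 1) ≤ N) := by omega
      simp only [pvCsum, hc1, hc2, if_false]
      have h2 : s + (t + 1) - N = (s + t - N) + 1 := by omega
      rw [h2, pvS_succ f (Nat.zero_le _)]; ring

-- index bookkeeping for the inner loop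
theorem pvMod_step (N s t : ℕ) :
    PySem.Int.mod ((((s + t) % N : ℕ) : ℤ) + 1) (N : ℤ) = (((s + t + 1) % N : ℕ) : ℤ) := by
  have h1 : ((((s + t) % N : ℕ) : ℤ) + 1) = (((s + t) % N + 1 : ℕ) : ℤ) := by push_cast; ring
  rw [h1, PySem.Int.mod_natCast]
  congr 1
  exact (Nat.ModEq.add_right 1 (Nat.mod_modEq (s + t) N))

theorem pvStep_diff (petrol dist : List Int) (N s t : ℕ) (hs : s < N) (ht : t < N) :
    pvCsum (pvD petrol dist) N s t +
      (PySem.List.pyGetD petrol (((s + t) % N : ℕ) : ℤ) 0 -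
       PySem.List.pyGetD dist (((s + t) % N : ℕ) : ℤ) 0) =
    pvCsum (pvD petrol dist) N s (t + 1) := by
  rw [PySem.List.pyGetD_natCast, PySem.List.pyGetD_natCast,
    pvCsum_succ (pvD petrol dist) hs ht]
  rfl

-- inner loop succeeds iff every remaining circular partial sum stays nonnegative
theorem inner_some (petrol dist : List Int) (N s : ℕ) (hs : s < N) :
    ∀ k t, t + k = N → t < N →
    (∀ u, t < u → u ≤ N → 0 ≤ pvCsum (pvD petrol dist) N s u) →
    petrolPumpInner petrol dist (N : ℤ) (s : ℤ) k (((s + t) % N : ℕ) : ℤ)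
      (pvCsum (pvD petrol dist) N s t) = some ((s : ℤ) + 1) := by
  intro k
  induction k with
  | zero => intro t h1 h2 _; omega
  | succ k ih =>
    intro t h1 h2 hok
    simp only [petrolPumpInner]
    rw [pvStep_diff petrol dist N s t hs h2]
    rw [if_neg (not_lt.2 (hok (t + 1) (by omega) (by omega)))]
    rw [pvMod_step N s t]
    rcases Nat.eq_or_lt_of_le (show t + 1 ≤ N by omega) with heq | hlt
    · have hmod : (s + t + 1) % N = s := by
        have h3 : s + t + 1 = s + N := by omega
        rw [h3, Nat.add_mod_right, Nat.mod_eq_of_lt hs]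
      rw [hmod, if_pos rfl]
    · have hne : (((s + t + 1) % N : ℕ) : ℤ) ≠ (s : ℤ) := by
        intro hc
        have hc' : (s + t + 1) % N = s := by exact_mod_cast hc
        have hmq : s ≡ s + (t + 1) [MOD N] := by
          show s % N = (s + (t + 1)) % N
          rw [Nat.mod_eq_of_lt hs, show s + (t + 1) = s + t + 1 from by omega]
          exact hc'.symm
        have hdvd : N ∣ t + 1 := by
          have h5 := (Nat.modEq_iff_dvd' (Nat.le_add_right s (t + 1))).mp hmq
          simpa using h5
        have h6 := Nat.le_of_dvd (by omega) hdvd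
        omega
      rw [if_neg hne]
      exact ih (t + 1) (by omega) hlt (fun u hu h2 => hok u (by omega) h2)

-- inner loop fails as soon as some remaining circular partial sum is negative
theorem inner_none (petrol dist : List Int) (N s : ℕ) (hs : s < N) :
    ∀ k t, t + k = N →
    (∃ u, t < u ∧ u ≤ N ∧ pvCsum (pvD petrol dist) N s u < 0) →
    petrolPumpInner petrol dist (N : ℤ) (s : ℤ) k (((s + t) % N : ℕ) : ℤ)
      (pvCsum (pvD petrol dist) N s t) = none := by
  intro k
  induction k with
  | zero => intro t h1 hex; obtain ⟨u, hu1, hu2, _⟩ := hex; omega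
  | succ k ih =>
    intro t h1 hex
    have h2 : t < N := by omega
    simp only [petrolPumpInner]
    rw [pvStep_diff petrol dist N s t hs h2]
    by_cases hneg : pvCsum (pvD petrol dist) N s (t + 1) < 0
    · rw [if_pos hneg]
    · rw [if_neg hneg]
      rw [pvMod_step N s t]
      obtain ⟨u, hu1, hu2, hu3⟩ := hex
      have hu4 : t + 1 < u := by
        rcases Nat.eq_or_lt_of_le (show t + 1 ≤ u by omega) with h | h
        · exact absurd (h ▸ hu3) hneg
        · exact h
      have hlt : t + 1 < N := by omega
      have hne : (((s + t + 1) % N : ℕ) : ℤ) ≠ (s : ℤ) := by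
        intro hc
        have hc' : (s + t + 1) % N = s := by exact_mod_cast hc
        have hmq : s ≡ s + (t + 1) [MOD N] := by
          show s % N = (s + (t + 1)) % N
          rw [Nat.mod_eq_of_lt hs, show s + (t + 1) = s + t + 1 from by omega]
          exact hc'.symm
        have hdvd : N ∣ t + 1 := by
          have h5 := (Nat.modEq_iff_dvd' (Nat.le_add_right s (t + 1))).mp hmq
          simpa using h5
        have h6 := Nat.le_of_dvd (by omega) hdvd
        omega
      rw [if_neg hne]
      exact ih (t + 1) (by omega) ⟨u, hu4, hu2, hu3⟩

-- greedy loop invariant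
theorem greedy_inv (f : ℕ → ℤ) (N : ℕ) :
    ∃ s : ℕ, s ≤ N ∧
      (List.range N).foldl (pvStep f) (0, 0, 0) = ((s : ℤ), pvS f s N, pvS f 0 N) ∧
      (∀ j, s ≤ j → j ≤ N → 0 ≤ pvS f s j) ∧
      (∀ m, m < s → pvS f m s < 0) := by
  induction N with
  | zero =>
    refine ⟨0, le_refl 0, ?_, ?_, ?_⟩
    · simp [pvS_self]
    · intro j h1 h2; have : j = 0 := by omega
      simp [this, pvS_self]
    · intro m hm; omega
  | succ N ih =>
    obtain ⟨s, hsle, hfold, I1, I2⟩ := ih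
    rw [List.range_succ, List.foldl_append, hfold, List.foldl_cons, List.foldl_nil]
    have hc : pvS f s N + f N = pvS f s (N + 1) := (pvS_succ f hsle).symm
    have htot : pvS f 0 N + f N = pvS f 0 (N + 1) := (pvS_succ f (Nat.zero_le N)).symm
    by_cases hneg : pvS f s (N + 1) < 0
    · refine ⟨N + 1, le_refl _, ?_, ?_, ?_⟩
      · simp only [pvStep, hc, htot, if_pos hneg]
        refine Prod.ext ?_ (Prod.ext ?_ rfl)
        · push_cast; rfl
        · simp [pvS_self]
      · intro j h1 h2
        have : j = N + 1 := by omega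
        simp [this, pvS_self]
      · intro m hm
        rcases Nat.lt_or_ge m s with h | h
        · have := I2 m h
          have hsplit := pvS_split f (Nat.le_of_lt h) (show s ≤ N + 1 by omega)
          linarith
        · have h0 := I1 m h (by omega)
          have hsplit := pvS_split f h (show m ≤ N + 1 by omega)
          linarith
    · refine ⟨s, by omega, ?_, ?_, I2⟩
      · simp only [pvStep, hc, htot, if_neg hneg]
      · intro j h1 h2
        rcases Nat.eq_or_lt_of_le h2 with h | h
        · rw [h]; exact not_lt.1 hneg
        · exact I1 j h1 (by omega)

-- first-match search distributes over append
theorem try_append (petrol dist : List Int) (n : Int) (l1 l2 : List Int) :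
    petrolPumpTry petrol dist n (l1 ++ l2) =
      (petrolPumpTry petrol dist n l1).or (petrolPumpTry petrol dist n l2) := by
  induction l1 with
  | nil => simp [petrolPumpTry]
  | cons s rest ih =>
    simp only [List.cons_append, petrolPumpTry]
    cases petrolPumpInner petrol dist n s n.toNat s 0 with
    | some r => rfl
    | none => simpa using ih

-- every start in L has a failing circular prefix ⇒ the whole search fails
theorem try_none (petrol dist : List Int) (N : ℕ) (L : List ℕ)
    (h : ∀ m ∈ L, m < N ∧ ∃ u, 0 < u ∧ u ≤ N ∧ pvCsum (pvD petrol dist) N m u < 0) :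
    petrolPumpTry petrol dist (N : ℤ) (L.map (fun (m : ℕ) => (m : ℤ))) = none := by
  induction L with
  | nil => rfl
  | cons m L ih =>
    obtain ⟨hmN, u, hu1, hu2, hu3⟩ := h m (List.mem_cons_self)
    simp only [List.map_cons, petrolPumpTry]
    have hinner := inner_none petrol dist N m hmN N 0 (by omega) ⟨u, hu1, hu2, hu3⟩
    rw [Nat.add_zero, Nat.mod_eq_of_lt hmN,
      pvCsum_zero (pvD petrol dist) (Nat.le_of_lt hmN)] at hinner
    rw [Int.toNat_natCast, hinner]
    exact ih (fun m' hm' => h m' (List.mem_cons_of_mem _ hm'))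

-- the two ports agree on every input (totalized via getD; faithfulness needs Pre_)
theorem main_eq (petrol dist : List Int) (n : Int) :
    petrolPump petrol dist n = petrolPump_alt petrol dist n := by
  by_cases hn : n ≤ 0
  · unfold petrolPump petrolPump_alt
    rw [PySem.List.pyRange_one_eq_nil hn, if_pos hn]
    rfl
  · replace hn : 0 < n := by omega
    obtain ⟨N, rfl⟩ : ∃ N : ℕ, n = (N : ℤ) := ⟨n.toNat, (Int.toNat_of_nonneg (le_of_lt hn)).symm⟩
    have hN : 0 < N := by exact_mod_cast hn
    obtain ⟨s, hsle, hfold, I1, I2⟩ := greedy_inv (pvD petrol dist) N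
    set f := pvD petrol dist with hf
    -- B's fold is the Nat-indexed greedy fold
    have hB : petrolPump_alt petrol dist (N : ℤ) =
        (if pvS f 0 N < 0 then none else some ((s : ℤ) + 1)) := by
      unfold petrolPump_alt
      rw [if_neg (by exact_mod_cast (not_le.2 hn)), PySem.List.pyRange_zero_nat, List.foldl_map]
      have hsteps : (fun (st : Int × Int × Int) (k : ℕ) =>
          (fun (st : Int × Int × Int) (i : Int) =>
            let g := PySem.List.pyGetD petrol i 0 - PySem.List.pyGetD dist i 0
            let total := st.2.2 + g
            let curr := st.2.1 + g
            if curr < 0 then (i + 1, 0, total) else (st.1, curr, total)) st ((k : ℕ) : ℤ))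
          = pvStep f := by
        funext st k
        simp only [PySem.List.pyGetD_natCast, pvStep, hf, pvD]
      rw [hsteps, hfold]
    rw [hB]
    unfold petrolPump
    rw [PySem.List.pyRange_zero_nat]
    by_cases htot : pvS f 0 N < 0
    · rw [if_pos htot]
      refine try_none petrol dist N (List.range N) (fun m hm => ?_)
      have hmN : m < N := List.mem_range.mp hm
      exact ⟨hmN, N, hN, le_refl N, by rw [pvCsum_full f hmN]; exact htot⟩
    · rw [if_neg htot]
      have hsN : s < N := by
        rcases Nat.lt_or_ge s N with h | h
        · exact h
        · exfalso
          have hs' : s = N := le_antisymm hsle h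
          have := I2 0 (by omega)
          rw [hs'] at this
          exact htot this
      have hok : ∀ u, 0 < u → u ≤ N → 0 ≤ pvCsum f N s u := by
        intro u hu1 hu2
        by_cases hw : s + u ≤ N
        · rw [pvCsum_nowrap f hw]
          exact I1 (s + u) (by omega) (by omega)
        · have hcs : pvCsum f N s u = pvS f s N + pvS f 0 (s + u - N) := by
            simp only [pvCsum, hw, if_false]
          have hmle : s + u - N ≤ s := by omega
          rcases Nat.eq_or_lt_of_le hmle with heq | hlt
          · have hsplit := pvS_split f (Nat.zero_le s) (Nat.le_of_lt hsN)
            rw [hcs, heq]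
            linarith [not_lt.1 htot]
          · have hI2 := I2 (s + u - N) hlt
            have hsplit1 : pvS f 0 s = pvS f 0 (s + u - N) + pvS f (s + u - N) s :=
              pvS_split f (Nat.zero_le _) (Nat.le_of_lt hlt)
            have hsplit2 : pvS f 0 N = pvS f 0 s + pvS f s N :=
              pvS_split f (Nat.zero_le s) (Nat.le_of_lt hsN)
            have htot' := not_lt.1 htot
            rw [hcs]
            linarith
      have hrange : List.range N = List.range s ++ List.map (fun x => s + x) (List.range (N - s)) := by
        conv_lhs => rw [show N = s + (N - s) by omega]
        rw [List.range_add]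
      rw [hrange, List.map_append, try_append]
      have h1 : petrolPumpTry petrol dist (N : ℤ) ((List.range s).map (fun (m : ℕ) => (m : ℤ))) = none := by
        refine try_none petrol dist N (List.range s) (fun m hm => ?_)
        have hms : m < s := List.mem_range.mp hm
        refine ⟨by omega, s - m, by omega, by omega, ?_⟩
        rw [pvCsum_nowrap f (by omega), show m + (s - m) = s by omega]
        exact I2 m hms
      rw [h1, Option.none_or]
      obtain ⟨M, hM⟩ : ∃ M, N - s = M + 1 := ⟨N - s - 1, by omega⟩
      rw [hM]
      simp only [List.range_succ_eq_map, List.map_cons, Nat.add_zero, petrolPumpTry]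
      have hinner := inner_some petrol dist N s hsN N 0 (by omega) hN
        (fun u hu1 hu2 => hok u (by omega) hu2)
      rw [Nat.add_zero, Nat.mod_eq_of_lt hsN, ← hf,
        pvCsum_zero f (Nat.le_of_lt hsN)] at hinner
      rw [Int.toNat_natCast, hinner]

-- ===== VERDICT (by name: the statement is the Claim_ definition above) =====
theorem petrolPump_spec : Claim_equal_petrolPump := by
  intro petrol dist n _dom _pre
  unfold Spec_petrolPump
  exact main_eq petrol dist n
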